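-- pv_equiv track=rewrite | github.com/jcrocholl/nxdom | languages/utils.py | word_groups
-- ===== SOURCE A (Python) =====
-- VOWELS = 'aeiouy'
--
-- def word_groups(word):
--     """
--     >>> list(word_groups('weight'))
--     ['w', 'ei', 'ght']
--     >>> list(word_groups('Eightyfive'))
--     ['ei', 'ght', 'y', 'f', 'i', 'v', 'e']
--     """
--     index = 0
--     word = word.lower()
--     while index < len(word):
--         # Find some consonants.
--         start = index
--         while index < len(word) and word[index] not in VOWELS:
--             index += 1
--         if index > start:
--             yield word[start:index]
--         # Find some vowels.
--         start = index
--         while index < len(word) and word[index] in VOWELS: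
--             index += 1
--         if index > start:
--             yield word[start:index]
-- ===== SOURCE B (Python) =====
-- VOWELS = 'aeiouy'
--
-- def word_groups(word):
--     w = word.lower()
--     n = len(w)
--     keys = [c in VOWELS for c in w]
--     cuts = [0] + [i for i in range(1, n) if keys[i] != keys[i - 1]] + [n]
--     for a, b in zip(cuts, cuts[1:]):
--         if a < b:
--             yield w[a:b]
-- ===== Notes on version B (the rewrite author's own statement) =====
-- stated objective: alternative
-- what changed: Replaces A's index-scanning alternating consonant-then-vowel double while loop with three staged passes: compute a vowel-key list, collect the boundary positions where the key changes, then slice the word at consecutive boundaries.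
import Mathlib
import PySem

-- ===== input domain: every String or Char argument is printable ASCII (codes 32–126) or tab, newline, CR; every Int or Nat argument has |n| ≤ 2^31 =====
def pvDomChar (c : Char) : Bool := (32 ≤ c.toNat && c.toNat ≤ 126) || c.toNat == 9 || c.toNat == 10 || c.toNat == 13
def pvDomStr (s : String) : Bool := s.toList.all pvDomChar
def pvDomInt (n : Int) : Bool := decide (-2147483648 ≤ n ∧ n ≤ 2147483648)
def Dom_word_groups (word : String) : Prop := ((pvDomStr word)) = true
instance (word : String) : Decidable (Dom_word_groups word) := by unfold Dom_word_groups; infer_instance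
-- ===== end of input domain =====

-- B replaces A's alternating consonant/vowel double while loop with three staged
-- passes: vowel-key list, change-boundary positions, then slicing at the boundaries
-- (alternative decomposition; same return value, same cost).

-- ===== PORT A =====
-- `c in VOWELS` for a single character
def pvIsVowel (c : Char) : Bool := (['a','e','i','o','u','y'] : List Char).contains c

-- `while index < len(word) and word[index] not in VOWELS: index += 1` (consumed count)
def pvConsRun : List Char → Nat
  | [] => 0
  | c :: r => if pvIsVowel c then 0 else pvConsRun r + 1

-- `while index < len(word) and word[index] in VOWELS: index += 1` (consumed count)
def pvVowRun : List Char → Nat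
  | [] => 0
  | c :: r => if pvIsVowel c then pvVowRun r + 1 else 0

theorem pvRuns_pos (c : Char) (r : List Char) :
    1 ≤ pvConsRun (c :: r) + pvVowRun ((c :: r).drop (pvConsRun (c :: r))) := by
  by_cases h : pvIsVowel c = true <;> simp [pvConsRun, pvVowRun, h] <;> omega

-- outer `while index < len(word)`; the suffix from `index` is the state
def pvLoop (l : List Char) : List String :=
  match l with
  | [] => []
  | c :: r =>
    let k := pvConsRun (c :: r)
    let rest := (c :: r).drop k
    let m := pvVowRun rest
    (if 0 < k then [String.mk ((c :: r).take k)] else []) ++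
    (if 0 < m then [String.mk (rest.take m)] else []) ++
    pvLoop (rest.drop m)
termination_by l.length
decreasing_by
  have h := pvRuns_pos c r
  simp only [List.length_drop, List.length_cons]
  omega

def word_groups (word : String) : List String :=
  pvLoop (PySem.Str.lower word).toList

-- ===== PORT B =====
-- Source B: w = word.lower(); keys = [c in VOWELS for c in w];
-- cuts = [0] + [i for i in range(1, n) if keys[i] != keys[i-1]] + [n];
-- yield w[a:b] for consecutive (a, b) with a < b
def word_groups_alt (word : String) : List String :=
  let w := (PySem.Str.lower word).toList
  let n : Int := w.length
  let keys : List Bool := w.map pvIsVowel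
  let cuts : List Int :=
    0 :: (PySem.List.pyRange 1 n 1).filter
      (fun i => PySem.List.pyGetD keys i false != PySem.List.pyGetD keys (i - 1) false)
      ++ [n]
  (cuts.zip cuts.tail).filterMap (fun ab =>
    if ab.1 < ab.2 then some (String.mk (PySem.List.slice w (some ab.1) (some ab.2)))
    else none)

-- ===== PRECONDITION & SPEC =====
def Spec_word_groups (word : String) (out : List String) : Prop := out = word_groups_alt word
instance (word : String) (out : List String) : Decidable (Spec_word_groups word out) := by unfold Spec_word_groups; infer_instance

-- ===== CLAIM (what is proved, stated in full; the proofs are below) =====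
def Claim_equal_word_groups : Prop := ∀ (word : String), Dom_word_groups word → Spec_word_groups word (word_groups word)

-- ===== LEMMAS AND PROOFS =====

def pvRunLen (b : Bool) : List Char → Nat
  | [] => 0
  | c :: r => if pvIsVowel c = b then pvRunLen b r + 1 else 0

def pvGroupby (l : List Char) : List (List Char) :=
  match l with
  | [] => []
  | c :: r =>
    let n := pvRunLen (pvIsVowel c) (c :: r)
    (c :: r).take n :: pvGroupby ((c :: r).drop n)
termination_by l.length
decreasing_by
  have h1 : 1 ≤ pvRunLen (pvIsVowel c) (c :: r) := by rw [pvRunLen, if_pos rfl]; omega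
  simp only [List.length_drop, List.length_cons]
  omega

def pvDiffPos (ks : List Bool) : List Nat :=
  ((List.range (ks.length - 1)).map (· + 1)).filter
    (fun i => ks.getD i false != ks.getD (i - 1) false)

def pvSegGo (w : List Char) : Nat → List Nat → List (List Char)
  | _, [] => []
  | a, b :: rest =>
    (if a < b then [(w.drop a).take (b - a)] else []) ++ pvSegGo w b rest

theorem segGo_shift (c : Char) (r : List Char) (a : Nat) (cs : List Nat) :
    pvSegGo (c :: r) (a + 1) (cs.map (· + 1)) = pvSegGo r a cs := by
  induction cs generalizing a with
  | nil => rfl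
  | cons b rest ih =>
    simp only [List.map_cons, pvSegGo, Nat.add_lt_add_iff_right, Nat.add_sub_add_right,
      List.drop_succ_cons, ih]

theorem diffPos_ge_one (ks : List Bool) (i : Nat) (h : i ∈ pvDiffPos ks) : 1 ≤ i := by
  unfold pvDiffPos at h
  simp only [List.mem_filter, List.mem_map, List.mem_range] at h
  omega

theorem pvDiffPos_cons (x y : Bool) (t : List Bool) :
    pvDiffPos (x :: y :: t) =
      (if x != y then [1] else []) ++ (pvDiffPos (y :: t)).map (· + 1) := by
  unfold pvDiffPos
  simp only [List.length_cons, Nat.add_sub_cancel, List.range_succ_eq_map,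
    List.map_cons, List.map_map, List.filter_cons, List.filter_map]
  have hf : ((fun i => (x :: y :: t).getD i false != (x :: y :: t).getD (i - 1) false) ∘
        (fun x => x + 1) ∘ Nat.succ)
      = ((fun i => (y :: t).getD i false != (y :: t).getD (i - 1) false) ∘ (fun x => x + 1)) := by
    funext k
    simp only [Function.comp, Nat.succ_eq_add_one]
    have h1 : k + 1 + 1 = k + 2 := rfl
    simp [h1]
  rw [hf]
  by_cases hxy : x = y
  · subst hxy; simp
  · cases x <;> cases y <;> simp_all

theorem groupby_cons₂ (c d : Char) (s : List Char) :
    pvGroupby (c :: d :: s) =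
      if pvIsVowel c = pvIsVowel d then
        (c :: (pvGroupby (d :: s)).headD []) :: (pvGroupby (d :: s)).tail
      else [c] :: pvGroupby (d :: s) := by
  rw [pvGroupby.eq_def]
  simp only []
  by_cases h : pvIsVowel c = pvIsVowel d
  · rw [if_pos h]
    have hr : pvRunLen (pvIsVowel c) (c :: d :: s)
        = pvRunLen (pvIsVowel d) (d :: s) + 1 := by
      rw [pvRunLen, if_pos rfl]
      congr 1
      rw [h]
    rw [hr]
    simp only [List.take_succ_cons, List.drop_succ_cons]
    conv_rhs => rw [pvGroupby.eq_def]
    simp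
  · rw [if_neg h]
    have hr : pvRunLen (pvIsVowel c) (c :: d :: s) = 1 := by
      rw [pvRunLen, if_pos rfl, pvRunLen,
        if_neg (fun hh => h (by rw [hh])), Nat.zero_add]
    rw [hr]
    simp

theorem segGo_eq_groupby : (w : List Char) →
    pvSegGo w 0 (pvDiffPos (w.map pvIsVowel) ++ [w.length]) = pvGroupby w
  | [] => by rw [pvGroupby.eq_def]; simp [pvDiffPos, pvSegGo]
  | [c] => by
      simp [pvDiffPos, pvSegGo, pvGroupby, pvRunLen]
  | c :: d :: s => by
      have ih := segGo_eq_groupby (d :: s)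
      simp only [List.map_cons] at ih
      rw [List.map_cons, List.map_cons, pvDiffPos_cons, groupby_cons₂]
      -- L := pvDiffPos (keys (d::s)) ++ [(d::s).length], nonempty with head ≥ 1
      obtain ⟨h0, Lt, hL, hh0⟩ :
          ∃ h0 Lt, pvDiffPos ((pvIsVowel d :: s.map pvIsVowel)) ++ [(d :: s).length]
              = h0 :: Lt ∧ 1 ≤ h0 := by
        cases hB : pvDiffPos (pvIsVowel d :: s.map pvIsVowel) with
        | nil => exact ⟨(d :: s).length, [], by simp [hB], by simp⟩
        | cons b0 rest =>
          exact ⟨b0, rest ++ [(d :: s).length], by simp [hB],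
            diffPos_ge_one _ b0 (by rw [hB]; exact List.mem_cons_self)⟩
      have hlen : (c :: d :: s).length = (d :: s).length + 1 := rfl
      rw [hlen]
      rw [hL] at ih
      by_cases h : pvIsVowel c = pvIsVowel d
      · have hbne : (pvIsVowel c != pvIsVowel d) = false := by simp [h]
        rw [if_pos h, hbne]
        simp only [if_neg (by simp : ¬ (false = true)), List.nil_append]
        have hcuts : (pvDiffPos (pvIsVowel d :: s.map pvIsVowel)).map (· + 1)
            ++ [(d :: s).length + 1] = ((h0 :: Lt).map (· + 1)) := by
          rw [← hL]; simp
        rw [hcuts]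
        simp only [List.map_cons]
        rw [pvSegGo]
        rw [if_pos (by omega)]
        rw [pvSegGo] at ih
        rw [if_pos (by omega)] at ih
        simp only [List.drop_zero, Nat.sub_zero] at ih ⊢
        rw [segGo_shift]
        rw [← ih]
        simp [List.take_succ_cons]
      · have hbne : (pvIsVowel c != pvIsVowel d) = true := by simp [h]
        rw [if_neg h, hbne]
        simp only [if_true, List.append_assoc, List.singleton_append, List.cons_append, List.nil_append]
        have hcuts : 1 :: ((pvDiffPos (pvIsVowel d :: s.map pvIsVowel)).map (· + 1)
            ++ [(d :: s).length + 1]) = 1 :: ((h0 :: Lt).map (· + 1)) := by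
          rw [← hL]; simp
        rw [hcuts]
        rw [pvSegGo, if_pos (by omega)]
        have hsh := segGo_shift c (d :: s) 0 (h0 :: Lt)
        simp only [Nat.zero_add] at hsh
        rw [hsh, ih]
        simp

theorem cuts_cast (w : List Char) :
    (PySem.List.pyRange 1 (w.length : Int) 1).filter
      (fun i => PySem.List.pyGetD (w.map pvIsVowel) i false
        != PySem.List.pyGetD (w.map pvIsVowel) (i - 1) false)
    = (pvDiffPos (w.map pvIsVowel)).map Int.ofNat := by
  rw [PySem.List.pyRange_one]
  have hlen : ((w.length : Int) - 1).toNat = (w.map pvIsVowel).length - 1 := by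
    simp only [List.length_map]; omega
  rw [hlen]
  unfold pvDiffPos
  rw [List.filter_map, List.filter_map, List.map_map]
  rw [List.filter_congr (fun k _ => ?_)]
  · apply List.map_congr_left
    intro k _
    simp only [Function.comp, Int.ofNat_eq_natCast]
    push_cast
    ring
  · simp only [Function.comp]
    have h1 : (1 : Int) + (k : Int) = ((k + 1 : Nat) : Int) := by push_cast; ring
    have h3 : ((k + 1 : Nat) : Int) - 1 = ((k : Nat) : Int) := by push_cast; ring
    rw [h1, PySem.List.pyGetD_natCast, h3, PySem.List.pyGetD_natCast]
    simp

theorem zip_filterMap_eq_segGo (w : List Char) : ∀ (L : List Nat) (a : Nat),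
    ((((a :: L).map Int.ofNat).zip (L.map Int.ofNat)).filterMap
      (fun ab => if ab.1 < ab.2
        then some (String.mk (PySem.List.slice w (some ab.1) (some ab.2))) else none))
    = (pvSegGo w a L).map String.mk
  | [], a => rfl
  | b :: rest, a => by
    have ih := zip_filterMap_eq_segGo w rest b
    simp only [List.map_cons, Int.ofNat_eq_natCast] at ih ⊢
    simp only [List.zip_cons_cons, List.filterMap_cons]
    have hsl : PySem.List.slice w (some ((a : Nat) : Int)) (some ((b : Nat) : Int))
        = (w.drop a).take (b - a) := PySem.List.slice_natCast w a b
    by_cases hab : a < b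
    · rw [if_pos (show ((a : Nat) : Int) < ((b : Nat) : Int) by exact_mod_cast hab)]
      simp [pvSegGo, hab, ih, hsl]
    · rw [if_neg (show ¬ ((a : Nat) : Int) < ((b : Nat) : Int) by exact_mod_cast hab)]
      simp [pvSegGo, hab, ih, hsl]

theorem zip_wrapper (w : List Char) (B : List Nat) (n : Nat) :
    ((((0 : Int) :: B.map Int.ofNat) ++ [(n : Int)]).zip
        ((((0 : Int) :: B.map Int.ofNat) ++ [(n : Int)]).tail)).filterMap
      (fun ab => if ab.1 < ab.2
        then some (String.mk (PySem.List.slice w (some ab.1) (some ab.2))) else none)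
    = (pvSegGo w 0 (B ++ [n])).map String.mk := by
  have h1 : ((0 : Int) :: B.map Int.ofNat) ++ [(n : Int)]
      = (0 :: (B ++ [n])).map Int.ofNat := by
    simp [Int.ofNat_eq_natCast]
  rw [h1]
  have h2 : ((0 :: (B ++ [n])).map Int.ofNat).tail = (B ++ [n]).map Int.ofNat :=
    rfl
  rw [h2]
  exact zip_filterMap_eq_segGo w (B ++ [n]) 0

theorem alt_eq_segGo (word : String) :
    word_groups_alt word
      = (pvSegGo (PySem.Str.lower word).toList 0
          (pvDiffPos ((PySem.Str.lower word).toList.map pvIsVowel)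
            ++ [(PySem.Str.lower word).toList.length])).map String.mk := by
  unfold word_groups_alt
  simp only []
  rw [cuts_cast]
  exact zip_wrapper _ _ _

theorem consRun_eq (l : List Char) : pvConsRun l = pvRunLen false l := by
  induction l with
  | nil => rfl
  | cons c r ih => by_cases h : pvIsVowel c = true <;> simp [pvConsRun, pvRunLen, h, ih]

theorem vowRun_eq (l : List Char) : pvVowRun l = pvRunLen true l := by
  induction l with
  | nil => rfl
  | cons c r ih => by_cases h : pvIsVowel c = true <;> simp [pvVowRun, pvRunLen, h, ih]

-- the character just after a maximal b-run has the opposite key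

theorem drop_runLen_head (b : Bool) (l : List Char) (c : Char) (r : List Char)
    (h : l.drop (pvRunLen b l) = c :: r) : pvIsVowel c = !b := by
  induction l with
  | nil => simp at h
  | cons d s ih =>
    by_cases hd : pvIsVowel d = b
    · rw [pvRunLen, if_pos hd] at h
      exact ih (by simpa using h)
    · rw [pvRunLen, if_neg hd] at h
      simp only [List.drop_zero] at h
      cases h
      cases b <;> simp_all

theorem loop_eq_groupby : (l : List Char) → pvLoop l = (pvGroupby l).map String.mk
  | [] => by simp [pvLoop, pvGroupby]
  | c :: r => by
    rw [pvLoop, pvGroupby.eq_def]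
    simp only []
    by_cases hc : pvIsVowel c = true
    · have hk : pvConsRun (c :: r) = 0 := by simp [pvConsRun, hc]
      have hm : 0 < pvRunLen true (c :: r) := by rw [pvRunLen, hc]; simp
      rw [hk, hc, vowRun_eq, List.drop_zero, if_neg (lt_irrefl 0), if_pos hm]
      simp only [List.nil_append, List.map_cons, List.singleton_append]
      rw [loop_eq_groupby ((c :: r).drop (pvRunLen true (c :: r)))]
    · have hc' : pvIsVowel c = false := by simp_all
      have hk : 0 < pvConsRun (c :: r) := by simp [pvConsRun, hc']
      rw [if_pos hk, consRun_eq, hc']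
      cases hrest : (c :: r).drop (pvRunLen false (c :: r)) with
      | nil =>
        simp [pvVowRun, pvLoop, pvGroupby]
      | cons d s =>
        have hd : pvIsVowel d = true := by
          simpa using drop_runLen_head false (c :: r) d s hrest
        have hm : 0 < pvVowRun (d :: s) := by simp [pvVowRun, hd]
        rw [if_pos hm, vowRun_eq, pvGroupby.eq_def]
        simp only [hd]
        simp only [List.map_cons, List.cons_append, List.nil_append]
        rw [loop_eq_groupby ((d :: s).drop (pvRunLen true (d :: s)))]
termination_by l => l.length
decreasing_by
  · have h1 : 1 ≤ pvRunLen true (c :: r) := by rw [pvRunLen, if_pos hc]; omega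
    simp only [List.length_drop, List.length_cons]
    omega
  · have hk' : 1 ≤ pvRunLen false (c :: r) := by rw [← consRun_eq]; exact hk
    have hlen := congrArg List.length hrest
    simp only [List.length_drop, List.length_cons] at hlen ⊢
    omega

-- B-side abstractions (Nat level)

-- boundary positions: i ∈ [1, len) with key i ≠ key (i-1)


-- ===== VERDICT (by name: the statement is the Claim_ definition above) =====
theorem word_groups_spec : Claim_equal_word_groups := by
  intro word _
  unfold Spec_word_groups word_groups
  rw [loop_eq_groupby, alt_eq_segGo, segGo_eq_groupby]
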